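-- pv_equiv track=rewrite | github.com/braph/mount-torsftp | mount.torsftp.py | parse_mount_options
-- ===== SOURCE A (Python) =====
-- def parse_mount_options(options):
--     chars = list(options)
--     option = ''
--
--     while chars:
--         c = chars.pop(0)
--
--         if c == ',':
--             yield option
--             option = ''
--
--         elif c == '\\':
--             try:
--                 option += chars.pop(0)
--             # Backslash without following any char means space
--             except IndexError:
--                 option += " "
--
--         else:
--             option += c
--
--     if option:
--         yield option
-- ===== SOURCE B (Python) =====
-- def parse_mount_options(options):
--     option = ''
--     escaped = False
--     for c in options:
--         if escaped:
--             option += c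
--             escaped = False
--         elif c == '\\':
--             escaped = True
--         elif c == ',':
--             yield option
--             option = ''
--         else:
--             option += c
--     if escaped:
--         option += ' '
--     if option:
--         yield option
-- ===== Notes on version B (the rewrite author's own statement) =====
-- stated objective: faster
-- what changed: Replaces A's destructive list.pop(0) lookahead (quadratic pops, try/except for the trailing backslash) with a single for-loop state machine carrying a boolean escape flag, handling a dangling escape after the loop.
import Mathlib
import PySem

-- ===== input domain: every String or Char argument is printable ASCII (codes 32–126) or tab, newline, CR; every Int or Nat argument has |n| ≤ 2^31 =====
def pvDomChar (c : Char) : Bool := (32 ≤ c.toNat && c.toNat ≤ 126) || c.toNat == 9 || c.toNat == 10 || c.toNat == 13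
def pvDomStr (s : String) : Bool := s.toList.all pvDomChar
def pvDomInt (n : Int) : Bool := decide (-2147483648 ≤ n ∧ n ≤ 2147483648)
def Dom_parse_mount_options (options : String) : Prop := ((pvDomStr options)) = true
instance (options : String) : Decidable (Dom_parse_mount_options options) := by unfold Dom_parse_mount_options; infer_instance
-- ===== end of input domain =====

-- B replaces A's destructive pop(0)/lookahead parsing with a one-pass state machine
-- carrying an 'escaped' flag (idiomatic; same yielded values).

-- ===== PORT A =====
-- A's while loop: pop the first char; on ',' yield; on '\' pop a lookahead char
-- (or append ' ' when the list is exhausted); otherwise append the char.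
def parseA : List Char → List Char → List String
  | [], option => if option ≠ [] then [String.ofList option] else []
  | c :: chars, option =>
    if c = ',' then String.ofList option :: parseA chars []
    else if c = '\\' then
      match chars with
      | [] => parseA [] (option ++ [' '])
      | d :: chars' => parseA chars' (option ++ [d])
    else parseA chars (option ++ [c])

def parse_mount_options (options : String) : List String :=
  parseA options.toList []

-- ===== PORT B =====
-- B's for loop with an 'escaped' flag; a dangling escape appends ' ' after the loop.
def parseB : List Char → Bool → List Char → List String
  | [], escaped, option =>
    let option := if escaped then option ++ [' '] else option
    if option ≠ [] then [String.ofList option] else []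
  | c :: rest, true, option => parseB rest false (option ++ [c])
  | c :: rest, false, option =>
    if c = '\\' then parseB rest true option
    else if c = ',' then String.ofList option :: parseB rest false []
    else parseB rest false (option ++ [c])

def parse_mount_options_alt (options : String) : List String :=
  parseB options.toList false []

-- ===== PRECONDITION & SPEC =====
def Spec_parse_mount_options (options : String) (out : List String) : Prop := out = parse_mount_options_alt options
instance (options : String) (out : List String) : Decidable (Spec_parse_mount_options options out) := by unfold Spec_parse_mount_options; infer_instance

-- ===== CLAIM (what is proved, stated in full; the proofs are below) =====
def Claim_equal_parse_mount_options : Prop := ∀ (options : String), Dom_parse_mount_options options → Spec_parse_mount_options options (parse_mount_options options)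

-- ===== LEMMAS AND PROOFS =====
lemma parseA_eq_parseB : ∀ (cs option : List Char), parseA cs option = parseB cs false option := by
  intro cs option
  induction cs, option using parseA.induct with
  | case3 chars option ih => rw [parseA.eq_def]; simp [parseB, ih]
  | case6 c chars option hc hb ih => rw [parseA.eq_def]; simp [parseB, hc, hb, ih]
  | _ => simp_all [parseA, parseB]

-- ===== VERDICT (by name: the statement is the Claim_ definition above) =====
theorem parse_mount_options_spec : Claim_equal_parse_mount_options := by
  intro options _
  unfold Spec_parse_mount_options parse_mount_options parse_mount_options_alt
  exact parseA_eq_parseB _ _
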